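-- pv_equiv track=rewrite | github.com/Pranav1ops/TalentHunt | backend/app/services/jd_parser.py | _detect_keyword_category
-- ===== SOURCE A (Python) =====
-- from typing import Dict, Any, List
--
-- def _detect_keyword_category(text: str, categories: Dict[str, List[str]]) -> str:
--     """Detect the best matching category from keyword list."""
--     best_cat = None
--     best_count = 0
--     for category, keywords in categories.items():
--         count = sum(1 for kw in keywords if kw in text)
--         if count > best_count:
--             best_count = count
--             best_cat = category
--     return best_cat
-- ===== SOURCE B (Python) =====
-- def _detect_keyword_category(text, categories):
--     """Index the text instead of scanning it per keyword: collect every substring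
--     of the text whose length occurs among the keywords into a hash set, so each
--     keyword test is a single set lookup; then pick the winner with one max()."""
--     lengths = set()
--     for kws in categories.values():
--         for kw in kws:
--             lengths.add(len(kw))
--     subs = set()
--     n = len(text)
--     for L in lengths:
--         for i in range(n - L + 1):
--             subs.add(text[i:i + L])
--     if not categories:
--         return None
--     cat, kws = max(categories.items(),
--                    key=lambda item: sum(kw in subs for kw in item[1]))
--     if not any(kw in subs for kw in kws):
--         return None
--     return cat
-- ===== Notes on version B (the rewrite author's own statement) =====
-- stated objective: faster
-- what changed: B never scans the text per keyword: it enumerates the text's windows once, indexing every substring whose length occurs among the keywords into a hash set, so each keyword test becomes one O(len) set lookup, and the winner is picked with a single max() over the tallied counts instead of A's running-best accumulator.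
import Mathlib
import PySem

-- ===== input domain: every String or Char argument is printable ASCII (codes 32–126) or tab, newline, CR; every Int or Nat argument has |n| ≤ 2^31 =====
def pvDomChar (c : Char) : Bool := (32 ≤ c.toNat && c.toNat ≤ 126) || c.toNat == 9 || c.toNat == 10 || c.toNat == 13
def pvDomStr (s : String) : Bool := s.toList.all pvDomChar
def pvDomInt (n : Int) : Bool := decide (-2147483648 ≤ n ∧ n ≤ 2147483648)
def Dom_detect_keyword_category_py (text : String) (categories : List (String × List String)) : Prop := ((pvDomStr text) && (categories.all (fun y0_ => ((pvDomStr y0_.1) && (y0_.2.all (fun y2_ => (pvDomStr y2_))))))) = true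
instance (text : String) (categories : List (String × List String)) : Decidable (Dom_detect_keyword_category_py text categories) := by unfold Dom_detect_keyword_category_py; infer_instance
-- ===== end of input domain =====

-- B indexes the text once — every substring whose length occurs among the keywords goes into a
-- set, so each keyword test is one set lookup — and picks the winner with a single max();
-- a genuinely different traversal (enumerate text windows, never scan the text per keyword).


-- ===== PORT A =====
-- count = sum(1 for kw in keywords if kw in text)
def pvCntA (text : String) (kws : List String) : Int :=
  ((kws.filter (fun kw => PySem.Str.isIn kw text)).map (fun _ => (1 : Int))).sum

def detect_keyword_category_py (text : String) (categories : List (String × List String)) : Option String :=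
  (categories.foldl
    (fun st p =>
      let count := pvCntA text p.2
      if count > st.2 then (some p.1, count) else st)
    ((none : Option String), (0 : Int))).1

-- ===== PORT B =====
-- lengths = {len(kw) for ...} built by the two explicit loops of Source B
def pvLens (categories : List (String × List String)) : PySem.Set Int :=
  categories.foldl
    (fun s p => p.2.foldl (fun s kw => PySem.Set.add s ((PySem.Str.len kw : Int))) s)
    PySem.Set.empty

-- subs = {text[i:i+L] for L in lengths for i in range(n - L + 1)}
def pvSubs (text : String) (lens : PySem.Set Int) : PySem.Set String :=
  lens.foldl
    (fun s L =>
      (PySem.List.pyRange 0 ((PySem.Str.len text : Int) - L + 1) 1).foldl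
        (fun s i => PySem.Set.add s (PySem.Str.slice text (some i) (some (i + L)))) s)
    PySem.Set.empty

-- sum(kw in subs for kw in item[1])
def pvCntB (subs : PySem.Set String) (kws : List String) : Int :=
  (kws.map (fun kw => if PySem.Set.contains subs kw then (1 : Int) else 0)).sum

def detect_keyword_category_py_alt (text : String) (categories : List (String × List String)) : Option String :=
  let subs := pvSubs text (pvLens categories)
  match PySem.List.max? categories (fun item => pvCntB subs item.2) with
  | none => none
  | some (cat, kws) =>
      if kws.any (fun kw => PySem.Set.contains subs kw) then some cat else none

-- ===== PRECONDITION & SPEC =====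
def Spec_detect_keyword_category_py (text : String) (categories : List (String × List String)) (out : Option String) : Prop := out = detect_keyword_category_py_alt text categories
instance (text : String) (categories : List (String × List String)) (out : Option String) : Decidable (Spec_detect_keyword_category_py text categories out) := by unfold Spec_detect_keyword_category_py; infer_instance

-- ===== CLAIM (what is proved, stated in full; the proofs are below) =====
def Claim_equal_detect_keyword_category_py : Prop := ∀ (text : String) (categories : List (String × List String)), Dom_detect_keyword_category_py text categories → Spec_detect_keyword_category_py text categories (detect_keyword_category_py text categories)

-- ===== LEMMAS AND PROOFS =====

theorem pvCntA_eq (text : String) (kws : List String) :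
    pvCntA text kws = ((kws.countP (fun kw => PySem.Str.isIn kw text) : Nat) : Int) := by
  simp [pvCntA, List.countP_eq_length_filter]

theorem pvCntA_nonneg (text : String) (kws : List String) : 0 ≤ pvCntA text kws := by
  rw [pvCntA_eq]; positivity

theorem pvCntA_pos_iff (text : String) (kws : List String) :
    0 < pvCntA text kws ↔ kws.any (fun kw => PySem.Str.isIn kw text) = true := by
  rw [pvCntA_eq]
  simp [List.countP_pos_iff, List.any_eq_true]

-- membership in an add-fold over a list
theorem pvMemFoldAdd {α β : Type} [BEq β] [LawfulBEq β] (l : List α) (f : α → β)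
    (s : PySem.Set β) (x : β) :
    x ∈ l.foldl (fun s a => PySem.Set.add s (f a)) s ↔ x ∈ s ∨ ∃ a ∈ l, f a = x := by
  induction l generalizing s with
  | nil => simp
  | cons a t ih =>
    rw [List.foldl_cons, ih]
    simp [pysem]
    tauto

-- every element of pvLens is the length of some keyword (hence a Nat cast)
theorem pvLens_mem_iff (categories : List (String × List String)) (L : Int) :
    L ∈ pvLens categories ↔ ∃ p ∈ categories, ∃ kw ∈ p.2, PySem.Str.len kw = L := by
  unfold pvLens
  suffices H : ∀ (s : PySem.Set Int),
      L ∈ categories.foldl (fun s p => p.2.foldl (fun s kw => PySem.Set.add s ((PySem.Str.len kw : Int))) s) s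
      ↔ L ∈ s ∨ ∃ p ∈ categories, ∃ kw ∈ p.2, PySem.Str.len kw = L by
    rw [H]; simp [PySem.Set.empty]
  induction categories with
  | nil => simp
  | cons p t ih =>
    intro s
    rw [List.foldl_cons, ih, pvMemFoldAdd,
      List.exists_mem_cons_iff (fun (q : String × List String) => ∃ kw ∈ q.2, PySem.Str.len kw = L)]
    exact or_assoc

theorem pvLens_nonneg (categories : List (String × List String)) (L : Int)
    (h : L ∈ pvLens categories) : 0 ≤ L := by
  rcases (pvLens_mem_iff categories L).mp h with ⟨p, _, kw, _, hL⟩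
  have : PySem.Str.len kw = (kw.toList.length : Int) := by simp [pysem]
  omega

-- membership in the substring index
theorem pvSubs_mem_iff (text : String) (lens : PySem.Set Int) (x : String) :
    x ∈ pvSubs text lens ↔ ∃ L ∈ lens,
      ∃ i ∈ PySem.List.pyRange 0 ((PySem.Str.len text : Int) - L + 1) 1,
        PySem.Str.slice text (some i) (some (i + L)) = x := by
  unfold pvSubs
  suffices H : ∀ (s : PySem.Set String),
      x ∈ lens.foldl (fun s L => (PySem.List.pyRange 0 ((PySem.Str.len text : Int) - L + 1) 1).foldl
        (fun s i => PySem.Set.add s (PySem.Str.slice text (some i) (some (i + L)))) s) s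
      ↔ x ∈ s ∨ ∃ L ∈ lens, ∃ i ∈ PySem.List.pyRange 0 ((PySem.Str.len text : Int) - L + 1) 1,
          PySem.Str.slice text (some i) (some (i + L)) = x by
    rw [H]; simp [PySem.Set.empty]
  induction lens with
  | nil => simp
  | cons L t ih =>
    intro s
    rw [List.foldl_cons, ih, pvMemFoldAdd,
      List.exists_mem_cons_iff (fun (L : Int) => ∃ i ∈ PySem.List.pyRange 0 ((PySem.Str.len text : Int) - L + 1) 1,
        PySem.Str.slice text (some i) (some (i + L)) = x)]
    exact or_assoc

-- a slice with nonnegative bounds is an infix of the text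
theorem pvSlice_infix (text : String) (i L : Int) (hi : 0 ≤ i) (hL : 0 ≤ L) :
    (PySem.Str.slice text (some i) (some (i + L))).toList <:+: text.toList := by
  rw [PySem.Str.toList_slice, PySem.Chars.slice_eq_listSlice,
    PySem.List.slice_toNat _ hi (by omega)]
  exact ((List.take_prefix _ _).isInfix).trans ((List.drop_suffix _ _).isInfix)

-- THE key fact: the set lookup 'kw in subs' equals Python's 'kw in text'
theorem pvSubs_contains (text : String) (categories : List (String × List String))
    (kw : String) (hmem : PySem.Str.len kw ∈ pvLens categories) :
    PySem.Set.contains (pvSubs text (pvLens categories)) kw = PySem.Str.isIn kw text := by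
  by_cases hin : PySem.Str.isIn kw text = true
  · rw [hin]
    rw [PySem.Set.contains_iff, pvSubs_mem_iff]
    refine ⟨PySem.Str.len kw, hmem, ?_⟩
    rw [PySem.Str.isIn_iff_infix] at hin
    rcases hin with ⟨pre, suf, hsplit⟩
    have hpre : kw.toList <+: text.toList.drop pre.length := by
      rw [← hsplit]
      simp
    have hlen : pre.length + kw.toList.length ≤ text.toList.length := by
      rw [← hsplit]; simp
    have hkc : PySem.Str.len kw = (kw.toList.length : Int) := by simp [pysem]
    have htc : PySem.Str.len text = (text.toList.length : Int) := by simp [pysem]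
    refine ⟨((pre.length : Nat) : Int), ?_, ?_⟩
    · rw [PySem.List.mem_pyRange_one, htc, hkc]
      constructor
      · positivity
      · omega
    · apply String.toList_inj.mp
      rw [PySem.Str.toList_slice, PySem.Chars.slice_eq_listSlice, hkc]
      rw [show ((pre.length : Nat) : Int) + ((kw.toList.length : Nat) : Int)
            = (((pre.length + kw.toList.length : Nat)) : Int) by push_cast; ring]
      rw [PySem.List.slice_natCast]
      rw [show pre.length + kw.toList.length - pre.length = kw.toList.length by omega]
      exact (List.prefix_iff_eq_take.mp hpre).symm
  · rw [Bool.not_eq_true] at hin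
    rw [hin]
    rw [← Bool.not_eq_true, PySem.Set.contains_iff, pvSubs_mem_iff]
    rintro ⟨L, hL, i, hi, hslice⟩
    have hL0 := pvLens_nonneg categories L hL
    have hi0 : 0 ≤ i := by
      rw [PySem.List.mem_pyRange_one] at hi; exact hi.1
    have : PySem.Str.isIn kw text = true := by
      rw [PySem.Str.isIn_iff_infix, ← hslice]
      exact pvSlice_infix text i L hi0 hL0
    rw [hin] at this
    cases this

theorem pvCntB_eq_of (text : String) (subs : PySem.Set String) (kws : List String)
    (h : ∀ kw ∈ kws, PySem.Set.contains subs kw = PySem.Str.isIn kw text) :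
    pvCntB subs kws = pvCntA text kws := by
  induction kws with
  | nil => simp [pvCntB, pvCntA]
  | cons x t ih =>
    have hx := h x (List.mem_cons_self ..)
    have ht := ih (fun kw hkw => h kw (List.mem_cons_of_mem _ hkw))
    simp only [pvCntB, List.map_cons, List.sum_cons] at *
    rw [hx, ht, pvCntA_eq, pvCntA_eq, List.countP_cons]
    push_cast
    ring

-- the winner of B's max?, expressed as a pair-level running max on A's counts
def pvBest (text : String) (l : List (String × List String)) (m : String × List String) :
    String × List String :=
  l.foldl (fun mm x => if pvCntA text mm.2 < pvCntA text x.2 then x else mm) m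

theorem pvBest_mem (text : String) (l : List (String × List String)) (m : String × List String) :
    pvBest text l m ∈ m :: l := by
  induction l generalizing m with
  | nil => simp [pvBest]
  | cons x t ih =>
    unfold pvBest
    rw [List.foldl_cons]
    by_cases hc : pvCntA text m.2 < pvCntA text x.2
    · rw [if_pos hc]
      exact List.mem_cons_of_mem _ (ih x)
    · rw [if_neg hc]
      rcases List.mem_cons.mp (ih m) with h | h
      · show pvBest text t m ∈ _
        rw [h]
        exact List.mem_cons_self ..
      · exact List.mem_cons_of_mem _ (List.mem_cons_of_mem _ h)

-- max?, seeded with a first element, is the pair-level running max on A's counts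
theorem pvMax_cons (text : String) (subs : PySem.Set String) :
    ∀ (l : List (String × List String)) (m : String × List String),
    (∀ p ∈ l, pvCntB subs p.2 = pvCntA text p.2) →
    pvCntB subs m.2 = pvCntA text m.2 →
    PySem.List.max? (m :: l) (fun item => pvCntB subs item.2) = some (pvBest text l m) := by
  intro l
  induction l with
  | nil => intro m _ _; rfl
  | cons x t ih =>
    intro m hl hm
    have ihx := ih x (fun p hp => hl p (List.mem_cons_of_mem _ hp)) (hl x (List.mem_cons_self ..))
    have ihm := ih m (fun p hp => hl p (List.mem_cons_of_mem _ hp)) hm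
    have hx := hl x (List.mem_cons_self ..)
    simp only [PySem.List.max?, List.foldl_cons] at ihx ihm ⊢
    unfold pvBest
    rw [List.foldl_cons]
    by_cases hc : pvCntA text m.2 < pvCntA text x.2
    · rw [if_pos (show pvCntB subs m.2 < pvCntB subs x.2 by rw [hm, hx]; exact hc), if_pos hc]
      exact ihx
    · rw [if_neg (show ¬ pvCntB subs m.2 < pvCntB subs x.2 by rw [hm, hx]; exact hc), if_neg hc]
      exact ihm

def pvAbs (text : String) (m : String × List String) : Option String × Int :=
  (if 0 < pvCntA text m.2 then some m.1 else none, pvCntA text m.2)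

-- A's accumulator is determined by the running-max pair
theorem pvInv (text : String) (l : List (String × List String)) (m : String × List String) :
    l.foldl
      (fun st p =>
        let count := pvCntA text p.2
        if count > st.2 then (some p.1, count) else st)
      (pvAbs text m) = pvAbs text (pvBest text l m) := by
  induction l generalizing m with
  | nil => simp [pvBest]
  | cons x t ih =>
    rw [List.foldl_cons]
    unfold pvBest
    rw [List.foldl_cons]
    have key : (if pvCntA text x.2 > (pvAbs text m).2 then (some x.1, pvCntA text x.2) else pvAbs text m)
        = pvAbs text (if pvCntA text m.2 < pvCntA text x.2 then x else m) := by
      unfold pvAbs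
      by_cases hc : pvCntA text m.2 < pvCntA text x.2
      · have h0 : 0 < pvCntA text x.2 := lt_of_le_of_lt (pvCntA_nonneg text m.2) hc
        rw [if_pos hc]
        simp [hc, h0]
      · rw [if_neg hc]
        simp [hc]
    simp only [key]
    exact ih _

theorem pv_main (text : String) (categories : List (String × List String)) :
    detect_keyword_category_py text categories = detect_keyword_category_py_alt text categories := by
  unfold detect_keyword_category_py detect_keyword_category_py_alt
  cases categories with
  | nil => rfl
  | cons x l =>
    have hcont : ∀ p ∈ x :: l, ∀ kw ∈ p.2,
        PySem.Set.contains (pvSubs text (pvLens (x :: l))) kw = PySem.Str.isIn kw text := by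
      intro p hp kw hkw
      apply pvSubs_contains
      rw [pvLens_mem_iff]
      exact ⟨p, hp, kw, hkw, rfl⟩
    have hkeys : ∀ p ∈ x :: l, pvCntB (pvSubs text (pvLens (x :: l))) p.2 = pvCntA text p.2 :=
      fun p hp => pvCntB_eq_of text _ p.2 (hcont p hp)
    -- A side
    rw [List.foldl_cons]
    have hfirst : (if pvCntA text x.2 > (((none : Option String), (0:Int))).2 then (some x.1, pvCntA text x.2) else ((none : Option String), (0:Int))) = pvAbs text x := by
      unfold pvAbs
      by_cases h0 : 0 < pvCntA text x.2
      · simp [h0]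
      · have := pvCntA_nonneg text x.2
        have hz : pvCntA text x.2 = 0 := by omega
        simp [hz]
    simp only [gt_iff_lt] at hfirst ⊢
    rw [hfirst, pvInv]
    -- B side
    have hmax : PySem.List.max? (x :: l) (fun item => pvCntB (pvSubs text (pvLens (x :: l))) item.2)
        = some (pvBest text l x) :=
      pvMax_cons text _ l x (fun p hp => hkeys p (List.mem_cons_of_mem _ hp))
        (hkeys x (List.mem_cons_self ..))
    rw [hmax]
    -- finish: the any-test is the positivity of the winning count
    have hbmem : pvBest text l x ∈ x :: l := pvBest_mem text l x
    have hany : (pvBest text l x).2.any (fun kw => PySem.Set.contains (pvSubs text (pvLens (x :: l))) kw)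
        = (pvBest text l x).2.any (fun kw => PySem.Str.isIn kw text) :=
      PySem.List.any_congr_mem (hcont _ hbmem)
    rcases hB : pvBest text l x with ⟨cat, kws⟩
    rw [hB] at hany
    simp only [pvAbs, hany]
    by_cases hA : kws.any (fun kw => PySem.Str.isIn kw text) = true
    · rw [if_pos hA, if_pos ((pvCntA_pos_iff text kws).mpr hA)]
    · rw [if_neg hA, if_neg (fun hp => hA ((pvCntA_pos_iff text kws).mp hp))]

-- ===== VERDICT (by name: the statement is the Claim_ definition above) =====
theorem detect_keyword_category_py_spec : Claim_equal_detect_keyword_category_py := by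
  intro text categories _
  unfold Spec_detect_keyword_category_py
  exact pv_main text categories
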